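-- pv_equiv track=rewrite | github.com/isaaclo123/transcriber-bot | transcriber_bot/bot.py | format_reddit_text
-- ===== SOURCE A (Python) =====
-- def format_reddit_text(text):
--     """format text into reddit block quote
--
--     :text: text to add to a comment
--     :returns: formatted text to add to a result, or None
--
--     """
--
--     if not text or len(text) <= 1 or text.isspace():
--         # if the text length is too short or blank
--         # return no text found message
--         # return "{message}\n\n".format(message=NO_TEXT_FOUND)
--         return None
--
--     # remove text leading and trailing whitespace if they exist
--     text = text.lstrip().rstrip()
--
--     # split text into lines
--     text_lines = text.splitlines()
--
--     final_text = ">"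
--     prev_is_space = False
--
--     for line in text_lines:
--         if line == "" or line.isspace():
--             # if the current line is whitespace
--             if prev_is_space:
--                 # if the previous line was whitespace
--                 continue
--             prev_is_space = True
--             final_text += "\n>\n>"
--         else:
--             # if the previous line is not whitespace, add a space and the
--             # line set prev_is_space to false
--             final_text += " " + line
--             prev_is_space = False
--
--     # add a final 2 newlines
--     final_text += "\n\n"
--
--     return final_text
-- ===== SOURCE B (Python) =====
-- def format_reddit_text(text):
--     """format text into reddit block quote
--
--     Same guard and strip; then a two-stage pipeline: first GROUP the lines
--     into maximal runs of equally-blank lines, then render each run at once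
--     (one '\n>\n>' marker per blank run, ' ' + line for each line of a
--     non-blank run) and join the pieces.
--     """
--     if not text or len(text) <= 1 or text.isspace():
--         return None
--
--     lines = text.strip().splitlines()
--
--     def blank(l):
--         return l == "" or l.isspace()
--
--     # stage 1: group into maximal runs of equal blankness
--     runs = []
--     i = 0
--     while i < len(lines):
--         j = i
--         while j < len(lines) and blank(lines[j]) == blank(lines[i]):
--             j += 1
--         runs.append((blank(lines[i]), lines[i:j]))
--         i = j
--
--     # stage 2: render the runs
--     out = [">"]
--     for is_blank, run in runs:
--         if is_blank:
--             out.append("\n>\n>")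
--         else:
--             out.extend(" " + l for l in run)
--     out.append("\n\n")
--     return "".join(out)
-- ===== Notes on version B (the rewrite author's own statement) =====
-- stated objective: alternative
-- what changed: Replaces A's single pass with a prev_is_space flag and string += by a two-stage pipeline: first group the lines into maximal runs of equally-blank lines, then render each run as a whole (one marker per blank run, ' '+line per line of a non-blank run) and join once.
import Mathlib
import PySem

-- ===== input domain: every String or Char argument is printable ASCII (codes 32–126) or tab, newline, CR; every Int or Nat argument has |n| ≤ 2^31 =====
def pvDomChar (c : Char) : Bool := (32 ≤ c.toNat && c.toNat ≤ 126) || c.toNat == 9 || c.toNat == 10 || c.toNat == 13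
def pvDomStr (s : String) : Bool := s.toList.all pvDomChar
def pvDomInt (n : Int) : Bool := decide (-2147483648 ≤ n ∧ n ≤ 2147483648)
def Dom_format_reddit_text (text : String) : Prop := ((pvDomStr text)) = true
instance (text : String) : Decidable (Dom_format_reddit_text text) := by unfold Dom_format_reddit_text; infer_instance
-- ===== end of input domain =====

-- B replaces A's flag-carrying single pass by a two-stage pipeline: group lines
-- into maximal runs of equal blankness, then render each run; objective: alternative.


-- ===== PORT A =====
def format_reddit_text (text : String) : Option String :=
  if text = "" ∨ PySem.Str.len text ≤ 1 ∨ PySem.Str.strIsspace text then none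
  else
    -- text = text.lstrip().rstrip()
    let t := PySem.Chars.rstrip (PySem.Chars.lstrip text.toList)
    let text_lines := PySem.Chars.splitlines t
    -- flag loop: state = (final_text, prev_is_space)
    let st := text_lines.foldl
      (fun (acc : List Char × Bool) line =>
        if line = [] ∨ PySem.Chars.strIsspace line then
          if acc.2 then acc else (acc.1 ++ ['\n', '>', '\n', '>'], true)
        else (acc.1 ++ (' ' :: line), false))
      (['>'], false)
    some (String.ofList (st.1 ++ ['\n', '\n']))

-- ===== PORT B =====
def pvBlank (l : List Char) : Bool := decide (l = []) || PySem.Chars.strIsspace l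

-- stage 1 of B: group the lines into maximal runs of equal blankness
def pvRuns : List (List Char) → List (Bool × List (List Char))
  | [] => []
  | l :: ls =>
    (pvBlank l, l :: ls.takeWhile (fun x => pvBlank x == pvBlank l)) ::
      pvRuns (ls.dropWhile (fun x => pvBlank x == pvBlank l))
  termination_by ls => ls.length
  decreasing_by
    simp only [List.length_cons]
    exact Nat.lt_succ_of_le (ls.length_dropWhile_le _)

-- stage 2 of B: render one run
def pvPiece (p : Bool × List (List Char)) : List Char :=
  if p.1 then ['\n', '>', '\n', '>'] else p.2.flatMap (fun l => ' ' :: l)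

def format_reddit_text_alt (text : String) : Option String :=
  if text = "" ∨ PySem.Str.len text ≤ 1 ∨ PySem.Str.strIsspace text then none
  else
    let lines := PySem.Chars.splitlines (PySem.Chars.strip text.toList)
    some (String.ofList (('>' :: (pvRuns lines).flatMap pvPiece) ++ ['\n', '\n']))

-- ===== PRECONDITION & SPEC =====
def Spec_format_reddit_text (text : String) (out : Option String) : Prop := out = format_reddit_text_alt text
instance (text : String) (out : Option String) : Decidable (Spec_format_reddit_text text out) := by unfold Spec_format_reddit_text; infer_instance

-- ===== CLAIM (what is proved, stated in full; the proofs are below) =====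
def Claim_equal_format_reddit_text : Prop := ∀ (text : String), Dom_format_reddit_text text → Spec_format_reddit_text text (format_reddit_text text)

-- ===== LEMMAS AND PROOFS =====

-- the semantics of A's flag loop, as a function of the remaining lines
def pvG (prev : Bool) : List (List Char) → List Char
  | [] => []
  | l :: ls =>
    if pvBlank l then (if prev then [] else ['\n', '>', '\n', '>']) ++ pvG true ls
    else (' ' :: l) ++ pvG false ls

theorem pv_foldA (ls : List (List Char)) : ∀ (acc : List Char) (prev : Bool),
    (ls.foldl
      (fun (acc : List Char × Bool) line =>
        if line = [] ∨ PySem.Chars.strIsspace line then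
          if acc.2 then acc else (acc.1 ++ ['\n', '>', '\n', '>'], true)
        else (acc.1 ++ (' ' :: line), false))
      (acc, prev)).1
    = acc ++ pvG prev ls := by
  induction ls with
  | nil => intro acc prev; simp [pvG]
  | cons l ls ih =>
    intro acc prev
    by_cases hb : l = [] ∨ PySem.Chars.strIsspace l
    · have hb' : pvBlank l = true := by
        simp only [pvBlank, Bool.or_eq_true, decide_eq_true_eq]; exact hb
      cases prev <;> simp [hb, hb', pvG, ih]
    · have hb' : pvBlank l = false := by
        simp only [pvBlank, Bool.or_eq_false_iff, decide_eq_false_iff_not]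
        exact ⟨fun h => hb (Or.inl h), by
          cases h : PySem.Chars.strIsspace l
          · rfl
          · exact absurd (Or.inr h) hb⟩
      simp [hb, hb', pvG, ih]

theorem pvG_blank_run (run rest : List (List Char))
    (h : ∀ x ∈ run, pvBlank x = true) :
    pvG true (run ++ rest) = pvG true rest := by
  induction run with
  | nil => rfl
  | cons x xs ih =>
    have hx : pvBlank x = true := h x (List.mem_cons_self)
    simp only [List.cons_append, pvG, hx, if_true, List.nil_append]
    exact ih (fun y hy => h y (List.mem_cons_of_mem _ hy))

theorem pvG_nonblank_run (run rest : List (List Char))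
    (h : ∀ x ∈ run, pvBlank x = false) :
    pvG false (run ++ rest) = run.flatMap (fun l => ' ' :: l) ++ pvG false rest := by
  induction run with
  | nil => simp
  | cons x xs ih =>
    have hx : pvBlank x = false := h x (List.mem_cons_self)
    simp only [List.cons_append, pvG, hx, Bool.false_eq_true, if_false, List.flatMap_cons,
      List.append_assoc]
    rw [ih (fun y hy => h y (List.mem_cons_of_mem _ hy))]

theorem pv_dropWhile_head {α : Type} (p : α → Bool) :
    ∀ (ls : List α) (x : α) (xs : List α), ls.dropWhile p = x :: xs → p x = false := by
  intro ls
  induction ls with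
  | nil => intro x xs h; simp [List.dropWhile] at h
  | cons a as ih =>
    intro x xs h
    by_cases ha : p a = true
    · rw [List.dropWhile_cons_of_pos ha] at h; exact ih x xs h
    · rw [List.dropWhile_cons_of_neg ha] at h
      cases h; simpa using ha

-- the two-stage grouping pipeline computes exactly the flag loop's output
theorem pv_runs_spec : ∀ (ls : List (List Char)),
    (pvRuns ls).flatMap pvPiece = pvG false ls
  | [] => by rw [pvRuns]; rfl
  | l :: ls => by
    rw [pvRuns]
    set p := fun x => pvBlank x == pvBlank l with hp
    have hsplit : ls = ls.takeWhile p ++ ls.dropWhile p := (ls.takeWhile_append_dropWhile).symm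
    have htake : ∀ x ∈ ls.takeWhile p, pvBlank x = pvBlank l := by
      intro x hx
      have := List.mem_takeWhile_imp hx
      simpa [hp] using this
    have ih := pv_runs_spec (ls.dropWhile p)
    by_cases hb : pvBlank l = true
    · -- blank run: one marker for the whole run
      have hpiece : pvPiece (pvBlank l, l :: ls.takeWhile p) = ['\n', '>', '\n', '>'] := by
        simp [pvPiece, hb]
      rw [List.flatMap_cons, hpiece, ih]
      have hGdrop : pvG true (ls.dropWhile p) = pvG false (ls.dropWhile p) := by
        cases hdrop : ls.dropWhile p with
        | nil => rfl
        | cons x xs =>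
          have hx := pv_dropWhile_head p ls x xs hdrop
          have hxb : pvBlank x = false := by
            simpa [hp, hb] using hx
          simp [pvG, hxb]
      conv_rhs => rw [pvG, hb, if_pos rfl]
      rw [hsplit, pvG_blank_run _ _ (fun x hx => by rw [htake x hx, hb]), hGdrop]
      simp
    · -- non-blank run: a space-prefixed copy of every line of the run
      have hb' : pvBlank l = false := by simpa using hb
      have hpiece : pvPiece (pvBlank l, l :: ls.takeWhile p)
          = (l :: ls.takeWhile p).flatMap (fun l => ' ' :: l) := by
        simp [pvPiece, hb']
      rw [List.flatMap_cons, hpiece, ih]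
      conv_rhs => rw [pvG, hb']
      simp only [Bool.false_eq_true, if_false]
      rw [hsplit, pvG_nonblank_run _ _ (fun x hx => by rw [htake x hx, hb'])]
      simp
  termination_by ls => ls.length
  decreasing_by
    simp only [List.length_cons]
    exact Nat.lt_succ_of_le (ls.length_dropWhile_le _)

-- ===== VERDICT (by name: the statement is the Claim_ definition above) =====
theorem format_reddit_text_spec : Claim_equal_format_reddit_text := by
  intro text _
  unfold Spec_format_reddit_text format_reddit_text format_reddit_text_alt
  by_cases hg : text = "" ∨ PySem.Str.len text ≤ 1 ∨ PySem.Str.strIsspace text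
  · rw [if_pos hg, if_pos hg]
  · rw [if_neg hg, if_neg hg]
    dsimp only
    have hstrip : PySem.Chars.strip text.toList
        = PySem.Chars.rstrip (PySem.Chars.lstrip text.toList) := rfl
    rw [hstrip]
    set lines := PySem.Chars.splitlines (PySem.Chars.rstrip (PySem.Chars.lstrip text.toList))
    rw [pv_foldA lines ['>'] false, pv_runs_spec lines]
    rfl
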